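-- pv_equiv track=rewrite | github.com/EdenMar/Cmput313Asn1 | asn1.py | getCheckBits
-- ===== SOURCE A (Python) =====
-- def getCheckBits(blockSize):
-- 	position = 1
-- 	rBits = 0
-- 	kBits = 0
-- 	K = blockSize
--
-- 	while kBits <= K: 	# may just need to be less than
-- 		if isPowOfTwo(position):
-- 			rBits += 1
-- 		else:
-- 			kBits += 1
-- 		position += 1
-- 	return rBits
--
-- def isPowOfTwo(val):
-- 	powers = (1, 2, 4, 8, 16, 32, 64, 128, 256, 512, 1024, 2048, 4096, 8192, 16384, 32768, 65536, 131072, 262144, 524288, 1048576, 2097152, 4194304, 8388608, 16777216, 33554432, 67108864, 134217728, 268435456, 536870912, 1073741824, 2147483648, 4294967296, 8589934592, 17179869184, 34359738368, 68719476736, 137438953472, 274877906944, 549755813888, 1099511627776, 2199023255552, 4398046511104, 8796093022208, 17592186044416, 35184372088832, 70368744177664, 140737488355328, 281474976710656, 562949953421312, 1125899906842624)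
-- 	if val in powers:
-- 		return True
-- 	else:
-- 		return False
-- ===== SOURCE B (Python) =====
-- def getCheckBits(blockSize):
--     # smallest r with 2^r - r - 1 data bits covering blockSize+1 (loop-exit count): O(log K)
--     r = 0
--     while (1 << r) - r - 1 <= blockSize:
--         r += 1
--     return r
-- ===== Notes on version B (the rewrite author's own statement) =====
-- stated objective: faster
-- what changed: Replaces the position-by-position walk over Hamming code positions (testing each position against a tuple of powers of two) by a direct search for the smallest r with 2^r - r - 1 > blockSize.
import Mathlib
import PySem

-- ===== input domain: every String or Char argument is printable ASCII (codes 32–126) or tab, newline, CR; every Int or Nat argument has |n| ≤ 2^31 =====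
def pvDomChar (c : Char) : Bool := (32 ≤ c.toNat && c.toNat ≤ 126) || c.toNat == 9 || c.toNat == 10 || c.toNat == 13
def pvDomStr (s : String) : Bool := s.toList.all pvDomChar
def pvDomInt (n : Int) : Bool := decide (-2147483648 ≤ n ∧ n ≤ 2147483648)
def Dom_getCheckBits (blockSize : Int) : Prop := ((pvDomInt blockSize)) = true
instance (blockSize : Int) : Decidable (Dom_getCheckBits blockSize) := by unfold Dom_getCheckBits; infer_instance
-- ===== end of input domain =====

-- B replaces A's position-by-position O(K) walk over Hamming code positions by a direct
-- O(log K) search for the smallest r with 2^r - r - 1 > blockSize (objective: faster).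

-- ===== PORT A =====
-- the 'powers' tuple of isPowOfTwo
def pyPowers : List Int := [1, 2, 4, 8, 16, 32, 64, 128, 256, 512, 1024, 2048, 4096, 8192, 16384, 32768, 65536, 131072, 262144, 524288, 1048576, 2097152, 4194304, 8388608, 16777216, 33554432, 67108864, 134217728, 268435456, 536870912, 1073741824, 2147483648, 4294967296, 8589934592, 17179869184, 34359738368, 68719476736, 137438953472, 274877906944, 549755813888, 1099511627776, 2199023255552, 4398046511104, 8796093022208, 17592186044416, 35184372088832, 70368744177664, 140737488355328, 281474976710656, 562949953421312, 1125899906842624]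

def isPowOfTwo (val : Int) : Bool := if pyPowers.contains val then true else false

-- every element of the tuple is at most 2^50 (used only for termination of the A-loop)
theorem pyPowers_le : ∀ v ∈ pyPowers, v ≤ 1125899906842624 := by decide

-- A's while-loop, state (position, rBits, kBits), step for step
def getCheckBitsLoop (K position rBits kBits : Int) : Int :=
  if _h : kBits ≤ K then
    if hp : isPowOfTwo position then
      getCheckBitsLoop K (position + 1) (rBits + 1) kBits
    else
      getCheckBitsLoop K (position + 1) rBits (kBits + 1)
  else
    rBits
termination_by ((K + 1 - kBits).toNat, (2251799813685248 - position).toNat)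
decreasing_by
  · have hv : position ≤ 1125899906842624 := by
      have : pyPowers.contains position := by
        simpa [isPowOfTwo] using hp
      exact pyPowers_le position (List.contains_iff_mem.mp this)
    apply Prod.Lex.right'
    · omega
    · omega
  · apply Prod.Lex.left
    omega

def getCheckBits (blockSize : Int) : Int :=
  getCheckBitsLoop blockSize 1 0 0

-- ===== PORT B =====
-- 2*r ≤ 2^r (used only for termination of the B-loop)
theorem two_mul_le_two_pow (r : Nat) : 2 * r ≤ 2 ^ r := by
  induction r with
  | zero => simp
  | succ n ih =>
    have h1 : (1:Nat) ≤ 2 ^ n := Nat.one_le_two_pow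
    have h2 : 2 ^ (n + 1) = 2 * 2 ^ n := by ring
    omega

-- B's while-loop: r counts up until (1 <<< r) - r - 1 > blockSize
def altLoop (K : Int) (r : Nat) : Int :=
  if (2:Int) ^ r - r - 1 ≤ K then altLoop K (r + 1) else (r : Int)
termination_by (K + 2 - r).toNat
decreasing_by
  rename_i h
  have h2 : (2 * r : Int) ≤ 2 ^ r := by exact_mod_cast two_mul_le_two_pow r
  omega

def getCheckBits_alt (blockSize : Int) : Int := altLoop blockSize 0

-- ===== PRECONDITION & SPEC =====
def Spec_getCheckBits (blockSize : Int) (out : Int) : Prop := out = getCheckBits_alt blockSize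
instance (blockSize : Int) (out : Int) : Decidable (Spec_getCheckBits blockSize out) := by unfold Spec_getCheckBits; infer_instance

-- ===== CLAIM (what is proved, stated in full; the proofs are below) =====
def Claim_equal_getCheckBits : Prop := ∀ (blockSize : Int), Dom_getCheckBits blockSize → Spec_getCheckBits blockSize (getCheckBits blockSize)

-- ===== LEMMAS AND PROOFS =====

-- altLoop returns r as soon as the guard first fails
theorem altLoop_eq (K : Int) (r r₀ : Nat) (hle : r₀ ≤ r)
    (hmin : ∀ s : Nat, s < r → (2:Int) ^ s - s - 1 ≤ K)
    (hr : ¬ ((2:Int) ^ r - r - 1 ≤ K)) : altLoop K r₀ = (r : Int) := by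
  induction hd : r - r₀ generalizing r₀ with
  | zero =>
    have : r₀ = r := by omega
    subst this
    rw [altLoop]
    simp [hr]
  | succ n ih =>
    have hlt : r₀ < r := by omega
    rw [altLoop]
    rw [if_pos (hmin r₀ hlt)]
    exact ih (r₀ + 1) (by omega) (by omega)

-- membership of 2^k in the tuple, for k ≤ 50
set_option maxRecDepth 4000 in
theorem pow_mem_pyPowers : ∀ k : Nat, k < 51 → isPowOfTwo ((2:Int) ^ k) = true := by decide

-- members of the tuple are powers of two
set_option maxRecDepth 4000 in
theorem mem_pyPowers_pow : ∀ v ∈ pyPowers, ∃ k : Nat, k < 51 ∧ v = (2:Int) ^ k := by decide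

-- Main loop invariant: A's loop, started in a consistent state, computes altLoop K 0.
theorem loopA_spec (K : Int) (hK : K ≤ 2147483648) :
    ∀ n : Nat, ∀ (position rBits kBits : Int) (r : Nat),
    2 * (K + 1 - kBits).toNat + (34 - r) ≤ n →
    rBits = (r : Int) →
    kBits = position - 1 - rBits →
    kBits ≤ K + 1 →
    position ≤ 2 ^ r →
    (2:Int) ^ r < 2 * position →
    r ≤ 33 →
    (∀ s : Nat, s < r → (2:Int) ^ s - s - 1 ≤ K) →
    getCheckBitsLoop K position rBits kBits = altLoop K 0 := by
  intro n
  induction n with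
  | zero =>
    intro position rBits kBits r hn h1 h2 h3 hU hL hr33 hJ
    -- measure ≤ 0 is impossible since 34 - r ≥ 1
    omega
  | succ n ih =>
    intro position rBits kBits r hn h1 h2 h3 hU hL hr33 hJ
    rw [getCheckBitsLoop]
    by_cases hg : kBits ≤ K
    · rw [dif_pos hg]
      by_cases hp : isPowOfTwo position = true
      · rw [dif_pos hp]
        -- position is a tuple member, hence 2^k with k < 51; the range invariant forces k = r
        obtain ⟨k, hk51, hkeq⟩ := mem_pyPowers_pow position
          (by
            have : pyPowers.contains position := by simpa [isPowOfTwo] using hp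
            exact List.contains_iff_mem.mp this)
        have hkr : k = r := by
          have hle : (2:Int) ^ k ≤ 2 ^ r := by omega
          have hlt : (2:Int) ^ r < 2 ^ (k + 1) := by
            have : (2:Int) ^ (k + 1) = 2 * 2 ^ k := by ring
            omega
          have h1' : k ≤ r := by
            by_contra hc
            have : (2:Int) ^ r < 2 ^ k :=
              pow_lt_pow_right₀ (by norm_num) (by omega)
            omega
          have h2' : r ≤ k := by
            by_contra hc
            have : (2:Int) ^ (k + 1) ≤ 2 ^ r :=
              pow_le_pow_right₀ (by norm_num) (by omega)
            omega
          omega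
        subst hkr
        have hpos : position = (2:Int) ^ k := hkeq
        -- r = 33 is impossible: kBits = 2^33 - 34 > 2^31 ≥ K contradicts the guard
        have hrlt : k ≤ 32 := by
          by_contra hc
          have hk33 : k = 33 := by omega
          subst hk33
          have : (2:Int) ^ 33 = 8589934592 := by norm_num
          omega
        refine ih (position + 1) (rBits + 1) kBits (k + 1) (by omega) (by omega)
          (by omega) h3 ?_ ?_ (by omega) ?_
        · have : (2:Int) ^ (k + 1) = 2 * 2 ^ k := by ring
          omega
        · have : (2:Int) ^ (k + 1) = 2 * 2 ^ k := by ring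
          omega
        · intro s hs
          by_cases hsk : s < k
          · exact hJ s hsk
          · have : s = k := by omega
            subst this
            omega
      · rw [dif_neg hp]
        -- position is not a power, in particular position ≠ 2^r (2^r IS in the tuple)
        have hne : position ≠ (2:Int) ^ r := by
          intro he
          rw [he] at hp
          exact hp (pow_mem_pyPowers r (by omega))
        refine ih (position + 1) rBits (kBits + 1) r (by omega) h1 (by omega)
          (by omega) (by omega) (by omega) hr33 hJ
    · rw [dif_neg hg]
      -- exit: kBits = K + 1; rBits is exactly the first r failing B's guard
      have hk1 : kBits = K + 1 := by omega
      rw [h1]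
      exact (altLoop_eq K r 0 (by omega) hJ (by omega)).symm

-- ===== VERDICT (by name: the statement is the Claim_ definition above) =====
theorem getCheckBits_spec : Claim_equal_getCheckBits := by
  intro K hdom
  have hK : K ≤ 2147483648 := by
    have := of_decide_eq_true hdom
    omega
  unfold Spec_getCheckBits getCheckBits getCheckBits_alt
  by_cases hneg : K + 1 ≤ 0
  · -- K ≤ -1: both loops exit immediately with 0
    rw [getCheckBitsLoop, altLoop]
    have h0 : ¬ ((0:Int) ≤ K) := by omega
    have h0' : ¬ ((2:Int) ^ (0:Nat) - (0:Nat) - 1 ≤ K) := by simp; omega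
    rw [dif_neg h0, if_neg h0']
    simp
  · exact loopA_spec K hK (2 * (K + 1).toNat + 34) 1 0 0 0 (by omega) rfl (by omega)
      (by omega) (by norm_num) (by norm_num) (by omega) (by intro s hs; omega)
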